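-- pv_equiv track=rewrite | github.com/ArIonMark1/Mesenger | tests/test_another.py | rec_method
-- ===== SOURCE A (Python) =====
-- def rec_method(numb, even=0, odd=0):
--     if numb == 0:  # базовое значение
--         return even, odd  # возврат значений щетчика если условие верно
--
--     else:
--         last_n = numb % 10  # берем последний элемент числа
--         numb = numb // 10  # удаляем из числа последний элемент
--         if last_n % 2 == 0:  # проверка взятого элемента( четный или не четный)
--             even += 1
--             return rec_method(numb, even, odd)
--         else:
--             odd += 1
--             return rec_method(numb, even, odd)
-- ===== SOURCE B (Python) =====
-- def rec_method(numb, even=0, odd=0):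
--     total = e = 0
--     while numb != 0:
--         numb, last = divmod(numb, 10)
--         total += 1
--         e += 1 - (last & 1)
--     return even + e, odd + total - e
-- ===== Notes on version B (the rewrite author's own statement) =====
-- stated objective: alternative
-- what changed: Replaces A's accumulator-threading recursion with a single while loop over divmod that counts total digits and even digits (bit test), deriving the odd count by subtraction at the end.
import Mathlib
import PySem

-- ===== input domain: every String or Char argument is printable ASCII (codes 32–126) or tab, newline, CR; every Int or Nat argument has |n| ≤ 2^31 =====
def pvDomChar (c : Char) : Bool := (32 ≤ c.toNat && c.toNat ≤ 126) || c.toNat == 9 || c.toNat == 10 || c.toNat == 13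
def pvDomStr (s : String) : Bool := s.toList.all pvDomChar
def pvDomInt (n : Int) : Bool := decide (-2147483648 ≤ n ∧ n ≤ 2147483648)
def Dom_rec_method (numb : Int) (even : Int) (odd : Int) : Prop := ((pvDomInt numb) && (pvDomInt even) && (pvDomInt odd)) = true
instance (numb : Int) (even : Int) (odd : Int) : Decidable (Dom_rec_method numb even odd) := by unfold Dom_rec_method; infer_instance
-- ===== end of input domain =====

-- B replaces A's accumulator-threading recursion with a single while loop that counts the
-- digits and the even digits (via a bit test), deriving the odd count by subtraction
-- (objective: simpler/idiomatic; same exact return value wherever A returns).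

-- ===== PORT A =====
-- A's recursion, fuel-totalised (fuel only makes the recursion structural; on Pre_ it never runs out)
def rec_method_go (fuel : Nat) (numb : Int) (even : Int) (odd : Int) : Int × Int :=
  match fuel with
  | 0 => (even, odd)
  | f + 1 =>
    if numb = 0 then (even, odd)
    else
      let last_n := PySem.Int.mod numb 10
      let numb' := PySem.Int.floordiv numb 10
      if PySem.Int.mod last_n 2 = 0 then rec_method_go f numb' (even + 1) odd
      else rec_method_go f numb' even (odd + 1)

def rec_method (numb : Int) (even : Int) (odd : Int) : Int × Int :=
  rec_method_go (numb.natAbs + 1) numb even odd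

-- ===== PORT B =====
-- B's while loop, fuel-totalised the same way; returns (total digit count, even digit count)
def rec_method_loop (fuel : Nat) (numb : Int) (total : Int) (e : Int) : Int × Int :=
  match fuel with
  | 0 => (total, e)
  | f + 1 =>
    if numb = 0 then (total, e)
    else
      match PySem.Int.divmod? numb 10 with
      | none => (total, e)  -- unreachable: the divisor 10 is non-zero
      | some (q, last) => rec_method_loop f q (total + 1) (e + (1 - PySem.Int.band last 1))

def rec_method_alt (numb : Int) (even : Int) (odd : Int) : Int × Int :=
  let p := rec_method_loop (numb.natAbs + 1) numb 0 0
  (even + p.2, odd + p.1 - p.2)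

-- ===== PRECONDITION & SPEC =====
-- Pre_ excludes numb < 0, where the Python A never returns (numb // 10 stalls at -1, infinite recursion).
def Pre_rec_method (numb : Int) (even : Int) (odd : Int) : Prop := 0 ≤ numb
instance (numb : Int) (even : Int) (odd : Int) : Decidable (Pre_rec_method numb even odd) := by unfold Pre_rec_method; infer_instance
def pvWitness_rec_method : Int × Int × Int := (1234, 0, 0)

def Spec_rec_method (numb : Int) (even : Int) (odd : Int) (out : Int × Int) : Prop := out = rec_method_alt numb even odd
instance (numb : Int) (even : Int) (odd : Int) (out : Int × Int) : Decidable (Spec_rec_method numb even odd out) := by unfold Spec_rec_method; infer_instance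

-- ===== CLAIM (what is proved, stated in full; the proofs are below) =====
def Claim_equal_rec_method : Prop := ∀ (numb : Int) (even : Int) (odd : Int), Dom_rec_method numb even odd → Pre_rec_method numb even odd → Spec_rec_method numb even odd (rec_method numb even odd)

-- ===== LEMMAS AND PROOFS =====

-- Fuel-indexed agreement of the two loops: both consume the same sequence of states, so the
-- equation holds for EVERY fuel; B's even/odd deltas are read off its (total, even) pair.
theorem go_eq_loop (f : Nat) : ∀ (n ev od t e : Int),
    rec_method_go f n ev od =
      (ev + ((rec_method_loop f n t e).2 - e),
       od + ((rec_method_loop f n t e).1 - t) - ((rec_method_loop f n t e).2 - e)) := by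
  induction f with
  | zero => intro n ev od t e; simp [rec_method_go, rec_method_loop]
  | succ f ih =>
    intro n ev od t e
    by_cases h : n = 0
    · simp [rec_method_go, rec_method_loop, h]
    · have h10 : (10 : Int) ≠ 0 := by decide
      have hdm : PySem.Int.divmod? n 10 =
          some (PySem.Int.floordiv n 10, PySem.Int.mod n 10) := by
        simp only [PySem.Int.divmod?]; norm_num
        exact ⟨Int.fdiv_eq_ediv_of_nonneg _ (by norm_num), by rw [Int.fmod_eq_emod]; simp⟩
      have hband : PySem.Int.band (PySem.Int.mod n 10) 1 =
          PySem.Int.mod (PySem.Int.mod n 10) 2 := PySem.Int.band_one _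
      have hnn : 0 ≤ PySem.Int.mod (PySem.Int.mod n 10) 2 :=
        PySem.Int.mod_nonneg _ (by decide)
      have hlt : PySem.Int.mod (PySem.Int.mod n 10) 2 < 2 :=
        PySem.Int.mod_lt _ (by decide)
      by_cases hp : PySem.Int.mod (PySem.Int.mod n 10) 2 = 0
      · have hgo : rec_method_go (f + 1) n ev od =
            rec_method_go f (PySem.Int.floordiv n 10) (ev + 1) od := by
          conv_lhs => rw [rec_method_go.eq_def]
          simp only [if_neg h, hp, if_pos]
        have hlp : ∀ t e : Int, rec_method_loop (f + 1) n t e =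
            rec_method_loop f (PySem.Int.floordiv n 10) (t + 1) (e + (1 - 0)) := by
          intro t e
          conv_lhs => rw [rec_method_loop.eq_def]
          simp only [if_neg h, hdm, hband, hp]
        rw [hgo, hlp, ih (PySem.Int.floordiv n 10) (ev + 1) od (t + 1) (e + (1 - 0))]
        refine Prod.ext ?_ ?_ <;> simp only [] <;> ring
      · have hp1 : PySem.Int.mod (PySem.Int.mod n 10) 2 = 1 := by omega
        have hgo : rec_method_go (f + 1) n ev od =
            rec_method_go f (PySem.Int.floordiv n 10) ev (od + 1) := by
          conv_lhs => rw [rec_method_go.eq_def]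
          simp only [if_neg h, if_neg hp]
        have hlp : ∀ t e : Int, rec_method_loop (f + 1) n t e =
            rec_method_loop f (PySem.Int.floordiv n 10) (t + 1) (e + (1 - 1)) := by
          intro t e
          conv_lhs => rw [rec_method_loop.eq_def]
          simp only [if_neg h, hdm, hband, hp1]
        rw [hgo, hlp, ih (PySem.Int.floordiv n 10) ev (od + 1) (t + 1) (e + (1 - 1))]
        refine Prod.ext ?_ ?_ <;> simp only [] <;> ring

-- ===== VERDICT (by name: the statement is the Claim_ definition above) =====
theorem rec_method_spec : Claim_equal_rec_method := by
  intro numb even odd _ _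
  unfold Spec_rec_method rec_method rec_method_alt
  rw [go_eq_loop (numb.natAbs + 1) numb even odd 0 0]
  simp
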